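-- pv_equiv track=rewrite | github.com/Rafaa-kn/WRECKIT60---dadakan- | recover_flag.py | unshift_left_xor_and_mask
-- ===== SOURCE A (Python) =====
-- def u32(x): return x & 0xFFFFFFFF
--
-- def unshift_left_xor_and_mask(y, shift, mask):
--     x = 0
--     for i in range(32):
--         idx = i
--         bit_y = (y >> idx) & 1
--         bit_x = bit_y
--         if idx - shift >= 0:
--             if ((mask >> idx) & 1):
--                 bit_x ^= (x >> (idx - shift)) & 1
--         x |= (bit_x << idx)
--     return u32(x)
-- ===== SOURCE B (Python) =====
-- def u32(x): return x & 0xFFFFFFFF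
--
-- def unshift_left_xor_and_mask(y, shift, mask):
--     # invert x ^= (x << shift) & mask on a 32-bit word by fixed-point iteration:
--     # a shift outside (0, 32) moves nothing inside the word, so y is already the answer
--     if shift <= 0 or shift >= 32:
--         return u32(y)
--     x = u32(y)
--     for _ in range(32):
--         nxt = u32(y ^ ((x << shift) & mask))
--         if nxt == x:
--             break
--         x = nxt
--     return x
-- ===== Notes on version B (the rewrite author's own statement) =====
-- stated objective: alternative
-- what changed: Replaces A's 32-step per-bit reconstruction (extracting and re-inserting one bit per iteration) with whole-word fixed-point iteration x -> u32(y ^ ((x << shift) & mask)), which recovers a full shift-sized block of bits per iteration and stops early at the fixed point; shifts outside (0,32) move nothing inside the 32-bit word, so y itself is the answer there.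
import Mathlib
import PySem

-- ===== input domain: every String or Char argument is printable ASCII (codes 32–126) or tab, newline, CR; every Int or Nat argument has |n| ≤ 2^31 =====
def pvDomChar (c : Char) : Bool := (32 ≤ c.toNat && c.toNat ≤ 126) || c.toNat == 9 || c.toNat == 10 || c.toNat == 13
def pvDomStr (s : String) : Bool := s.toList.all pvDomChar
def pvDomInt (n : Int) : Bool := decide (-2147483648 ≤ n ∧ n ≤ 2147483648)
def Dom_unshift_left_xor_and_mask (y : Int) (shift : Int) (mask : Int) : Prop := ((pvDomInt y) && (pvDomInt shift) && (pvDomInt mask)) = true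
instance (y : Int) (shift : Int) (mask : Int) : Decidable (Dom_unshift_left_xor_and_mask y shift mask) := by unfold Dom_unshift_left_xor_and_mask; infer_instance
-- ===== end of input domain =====

-- B replaces A's per-bit reconstruction by whole-word fixed-point iteration (same values; alternative algorithm, not claimed faster).

-- ===== PORT A =====
def pvU32 (x : Int) : Int := PySem.Int.band x 0xFFFFFFFF

def pvAStep (y shift mask : Int) (x : Int) (i : Int) : Int :=
  let idx := i
  let bit_y := PySem.Int.band (y >>> idx.toNat) 1
  let bit_x := bit_y
  let bit_x := if 0 ≤ idx - shift then
      (if PySem.Int.band (mask >>> idx.toNat) 1 ≠ 0 then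
        PySem.Int.bxor bit_x (PySem.Int.band (x >>> (idx - shift).toNat) 1)
      else bit_x)
    else bit_x
  PySem.Int.bor x (bit_x <<< idx.toNat)

def unshift_left_xor_and_mask (y : Int) (shift : Int) (mask : Int) : Int :=
  pvU32 ((PySem.List.pyRange 0 32).foldl (pvAStep y shift mask) 0)

-- ===== PORT B =====
def pvBIter (y shift mask : Int) : Nat → Int → Int
  | 0, x => x
  | Nat.succ k, x =>
    let nxt := pvU32 (PySem.Int.bxor y (PySem.Int.band (x <<< shift.toNat) mask))
    if nxt = x then x else pvBIter y shift mask k nxt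

def unshift_left_xor_and_mask_alt (y : Int) (shift : Int) (mask : Int) : Int :=
  if shift ≤ 0 ∨ 32 ≤ shift then pvU32 y
  else pvBIter y shift mask 32 (pvU32 y)

-- ===== PRECONDITION & SPEC =====
def Spec_unshift_left_xor_and_mask (y : Int) (shift : Int) (mask : Int) (out : Int) : Prop := out = unshift_left_xor_and_mask_alt y shift mask
instance (y : Int) (shift : Int) (mask : Int) (out : Int) : Decidable (Spec_unshift_left_xor_and_mask y shift mask out) := by unfold Spec_unshift_left_xor_and_mask; infer_instance

-- ===== CLAIM (what is proved, stated in full; the proofs are below) =====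
def Claim_equal_unshift_left_xor_and_mask : Prop := ∀ (y : Int) (shift : Int) (mask : Int), Dom_unshift_left_xor_and_mask y shift mask → Spec_unshift_left_xor_and_mask y shift mask (unshift_left_xor_and_mask y shift mask)

-- ===== LEMMAS AND PROOFS =====

-- the intended bit pattern of the recovered word (proof-side spec only)
def pvG (y mask shift : Int) (j : Nat) : Bool :=
  if _h : 0 < shift ∧ shift ≤ (j : Int) ∧ mask.testBit j then
    xor (pvG y mask shift (j - shift.toNat)) (y.testBit j)
  else y.testBit j
termination_by j
decreasing_by omega

-- ---- generic Int/Nat bit lemmas ----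
theorem pv_testBit_toNat (a : Int) (ha : 0 ≤ a) (j : Nat) : a.testBit j = a.toNat.testBit j := by
  cases a with
  | ofNat m => rfl
  | negSucc m => exact absurd ha (by simp)

theorem pv_testBit_neg (a : Int) (ha : a < 0) (j : Nat) : a.testBit j = !((-a-1).toNat.testBit j) := by
  cases a with
  | ofNat m => exact absurd ha (Int.not_lt.mpr (Int.natCast_nonneg m))
  | negSucc m =>
    have h : (-(Int.negSucc m) - 1).toNat = m := by simp [Int.negSucc_eq]
    rw [h]; rfl

theorem pv_sub_land_testBit (j : Nat) : ∀ (a m : Nat), (a - (a &&& m)).testBit j = (a.testBit j && !(m.testBit j)) := by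
  induction j with
  | zero =>
    intro a m
    have h1 : a &&& m ≤ a := Nat.and_le_left
    have h2 : (a &&& m).testBit 0 = (a.testBit 0 && m.testBit 0) := Nat.testBit_and ..
    simp only [Nat.testBit_zero] at h2 ⊢
    by_cases ha : a % 2 = 1 <;> by_cases hm : m % 2 = 1 <;>
      simp only [ha, hm, decide_true, decide_false, Bool.and_true, Bool.and_false, Bool.not_true,
        Bool.not_false, decide_eq_true_eq, decide_eq_false_iff_not] at h2 ⊢ <;> omega
  | succ j ih =>
    intro a m
    have h1 : a &&& m ≤ a := Nat.and_le_left
    have h3 : (a &&& m) % 2 ≤ a % 2 := by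
      have h2 : (a &&& m).testBit 0 = (a.testBit 0 && m.testBit 0) := Nat.testBit_and ..
      simp only [Nat.testBit_zero] at h2
      by_cases ha : a % 2 = 1 <;> by_cases hm : m % 2 = 1 <;>
        simp only [ha, hm, decide_true, decide_false, Bool.and_true, Bool.and_false,
          decide_eq_true_eq, decide_eq_false_iff_not] at h2 <;> omega
    have hdiv : (a &&& m) / 2 = a / 2 &&& m / 2 := by
      have h := @Nat.shiftRight_and_distrib 1 a m
      simpa [Nat.shiftRight_one] using h
    have hsub : (a - (a &&& m)) / 2 = a / 2 - (a / 2 &&& m / 2) := by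
      rw [← hdiv]; omega
    rw [Nat.testBit_succ, Nat.testBit_succ, Nat.testBit_succ, hsub, ih]

theorem pv_band_testBit (a b : Int) (j : Nat) : (PySem.Int.band a b).testBit j = (a.testBit j && b.testBit j) := by
  unfold PySem.Int.band
  by_cases ha : 0 ≤ a <;> by_cases hb : 0 ≤ b <;> simp only [ha, hb, if_pos, if_neg, if_true, if_false]
  · rw [pv_testBit_toNat _ (by positivity) j, Int.toNat_natCast, Nat.testBit_and,
      pv_testBit_toNat a ha, pv_testBit_toNat b hb]
  · rw [pv_testBit_toNat _ (by positivity) j, Int.toNat_natCast, pv_sub_land_testBit,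
      pv_testBit_toNat a ha, pv_testBit_neg b (by omega)]
  · rw [pv_testBit_toNat _ (by positivity) j, Int.toNat_natCast, pv_sub_land_testBit,
      pv_testBit_toNat b hb, pv_testBit_neg a (by omega), Bool.and_comm]
  · rw [pv_testBit_neg _ (by omega) j]
    have : (-(-(((-a-1).toNat ||| (-b-1).toNat : Nat) : Int) - 1) - 1).toNat = ((-a-1).toNat ||| (-b-1).toNat) := by omega
    rw [this, Nat.testBit_or, pv_testBit_neg a (by omega), pv_testBit_neg b (by omega)]
    cases ((-a-1).toNat.testBit j) <;> cases ((-b-1).toNat.testBit j) <;> rfl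

theorem pv_bxor_testBit (a b : Int) (j : Nat) : (PySem.Int.bxor a b).testBit j = ((a.testBit j) ^^ (b.testBit j)) := by
  unfold PySem.Int.bxor
  by_cases ha : 0 ≤ a <;> by_cases hb : 0 ≤ b <;> simp only [ha, hb, if_pos, if_neg, if_true, if_false]
  · rw [pv_testBit_toNat _ (by positivity) j, Int.toNat_natCast, Nat.testBit_xor,
      pv_testBit_toNat a ha, pv_testBit_toNat b hb]
  · rw [pv_testBit_neg _ (by omega) j]
    have : (-(-(((a.toNat ^^^ (-b-1).toNat : Nat) : Int)) - 1) - 1).toNat = (a.toNat ^^^ (-b-1).toNat) := by omega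
    rw [this, Nat.testBit_xor, pv_testBit_toNat a ha, pv_testBit_neg b (by omega)]
    cases (a.toNat.testBit j) <;> cases ((-b-1).toNat.testBit j) <;> rfl
  · rw [pv_testBit_neg _ (by omega) j]
    have : (-(-((((-a-1).toNat ^^^ b.toNat : Nat) : Int)) - 1) - 1).toNat = ((-a-1).toNat ^^^ b.toNat) := by omega
    rw [this, Nat.testBit_xor, pv_testBit_toNat b hb, pv_testBit_neg a (by omega)]
    cases ((-a-1).toNat.testBit j) <;> cases (b.toNat.testBit j) <;> rfl
  · rw [pv_testBit_toNat _ (by positivity) j, Int.toNat_natCast, Nat.testBit_xor,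
      pv_testBit_neg a (by omega), pv_testBit_neg b (by omega)]
    cases ((-a-1).toNat.testBit j) <;> cases ((-b-1).toNat.testBit j) <;> rfl

theorem pv_shiftRight_testBit (a : Int) (i j : Nat) : (a >>> i).testBit j = a.testBit (i + j) := by
  cases a with
  | ofNat m => exact Nat.testBit_shiftRight m
  | negSucc m =>
    have h : (Int.negSucc m) >>> i = Int.negSucc (m >>> i) := rfl
    rw [h]
    show (!((m >>> i).testBit j)) = (!(m.testBit (i + j)))
    rw [Nat.testBit_shiftRight]

theorem pv_shiftLeft_testBit (a : Int) (ha : 0 ≤ a) (i j : Nat) : (a <<< i).testBit j = (decide (j ≥ i) && a.testBit (j - i)) := by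
  cases a with
  | ofNat m => exact Nat.testBit_shiftLeft m
  | negSucc m => exact absurd ha (by simp)

theorem pv_one_shiftLeft_testBit (n j : Nat) : (1 <<< n).testBit j = decide (j = n) := by
  rw [Nat.testBit_shiftLeft]
  rcases Nat.lt_trichotomy j n with h|h|h
  · have h' : ¬ (j ≥ n) := by omega
    simp [h']; omega
  · subst h; simp
  · have h1 : j ≥ n := by omega
    have h2 : j - n = (j - n - 1) + 1 := by omega
    rw [h2, Nat.testBit_succ]
    simp [h1]; omega

theorem pv_int_eq_of_bits (a b : Int) (ha : 0 ≤ a) (hb : 0 ≤ b)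
    (h : ∀ j, a.testBit j = b.testBit j) : a = b := by
  rw [← Int.toNat_of_nonneg ha, ← Int.toNat_of_nonneg hb]
  congr 1
  apply Nat.eq_of_testBit_eq
  intro i
  rw [← pv_testBit_toNat a ha, ← pv_testBit_toNat b hb]
  exact h i

theorem pv_u32_nonneg (x : Int) : 0 ≤ pvU32 x := by
  unfold pvU32
  rw [PySem.Int.band_comm]
  exact PySem.Int.band_nonneg_of_nonneg_left x (by norm_num)

theorem pv_u32_testBit (x : Int) (j : Nat) : (pvU32 x).testBit j = (decide (j < 32) && x.testBit j) := by
  unfold pvU32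
  rw [pv_band_testBit]
  have hm : (0xFFFFFFFF : Int).testBit j = decide (j < 32) := by
    rw [pv_testBit_toNat _ (by norm_num)]
    have h0 : (0xFFFFFFFF : Int).toNat = 4294967295 := rfl
    have h1 : (4294967295 : Nat) = 2 ^ 32 - 1 := by norm_num
    rw [h0, h1, Nat.testBit_two_pow_sub_one]
  rw [hm, Bool.and_comm]

theorem pv_band1 (a : Int) : PySem.Int.band a 1 = if a.testBit 0 then 1 else 0 := by
  unfold PySem.Int.band
  by_cases ha : 0 ≤ a
  · simp only [ha, if_true, show (0:Int) ≤ 1 by norm_num]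
    rw [pv_testBit_toNat a ha, show (1:Int).toNat = 1 from rfl, Nat.and_one_is_mod,
      Nat.testBit_zero]
    by_cases h : a.toNat % 2 = 1 <;> simp [h] <;> omega
  · simp only [ha, if_false, if_true, show (0:Int) ≤ 1 by norm_num]
    rw [pv_testBit_neg a (by omega), show (1:Int).toNat = 1 from rfl, Nat.testBit_zero]
    have h1 : 1 &&& (-a-1).toNat = (-a-1).toNat % 2 := by
      rw [Nat.and_comm, Nat.and_one_is_mod]
    rw [h1]
    by_cases h : (-a-1).toNat % 2 = 1 <;> simp [h] <;> omega

theorem pv_bit (a : Int) (i : Nat) : PySem.Int.band (a >>> i) 1 = if a.testBit i then 1 else 0 := by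
  rw [pv_band1, pv_shiftRight_testBit]
  simp

theorem pv_bxor01 (p q : Bool) :
    PySem.Int.bxor (if p then 1 else 0) (if q then 1 else 0) = if (p ^^ q) then 1 else 0 := by
  cases p <;> cases q <;> rfl

-- ---- A-side loop invariant ----
def pvAFold (y shift mask : Int) (n : Nat) : Int :=
  (PySem.List.pyRange 0 (n : Int)).foldl (pvAStep y shift mask) 0

theorem pvAFold_succ (y shift mask : Int) (n : Nat) :
    pvAFold y shift mask (n+1) = pvAStep y shift mask (pvAFold y shift mask n) (n : Int) := by
  unfold pvAFold
  have hsplit : PySem.List.pyRange 0 ((n:Int)+1) =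
      PySem.List.pyRange 0 (n:Int) ++ PySem.List.pyRange (n:Int) ((n:Int)+1) := by
    exact PySem.List.pyRange_one_append 0 (n:Int) ((n:Int)+1) (by omega) (by omega)
  have hone : PySem.List.pyRange (n:Int) ((n:Int)+1) = [(n:Int)] := by
    rw [PySem.List.pyRange_one_cons (by omega)]
    simp [PySem.List.pyRange]
  have hc : ((n+1 : Nat) : Int) = (n:Int)+1 := by omega
  rw [hc, hsplit, hone, List.foldl_append]
  rfl

theorem pvA_inv (y shift mask : Int) (n : Nat) :
    0 ≤ pvAFold y shift mask n ∧
    ∀ j, (pvAFold y shift mask n).testBit j = (decide (j < n) && pvG y mask shift j) := by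
  induction n with
  | zero =>
    constructor
    · unfold pvAFold; simp [PySem.List.pyRange]
    · intro j; unfold pvAFold; simp [PySem.List.pyRange]
      exact Nat.zero_testBit j
  | succ n ih =>
    obtain ⟨hx, hb⟩ := ih
    set x := pvAFold y shift mask n
    rw [pvAFold_succ]
    have hidx : ((n:Int)).toNat = n := by omega
    -- the final bit written at position n, as a Bool
    have key : ∃ B : Bool, pvAStep y shift mask x (n:Int) =
        PySem.Int.bor x ((if B then (1:Int) else 0) <<< n) ∧ B = pvG y mask shift n := by
      by_cases hc1 : (0:Int) ≤ (n:Int) - shift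
      · by_cases hc2 : PySem.Int.band (mask >>> ((n:Int)).toNat) 1 ≠ 0
        · have hmb : mask.testBit n = true := by
            rcases h : mask.testBit n
            · rw [hidx, pv_bit mask n, h] at hc2; simp at hc2
            · rfl
          refine ⟨(y.testBit n) ^^ (x.testBit ((n:Int) - shift).toNat), ?_, ?_⟩
          · rw [hidx] at hc2
            unfold pvAStep
            simp only [hidx, if_pos hc1, if_pos hc2]
            rw [pv_bit y n, pv_bit x, pv_bxor01]
          · rw [pvG]
            by_cases hs : 0 < shift
            · have hsle : shift ≤ (n:Int) := by omega
              have hk : ((n:Int) - shift).toNat = n - shift.toNat := by omega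
              have hklt : n - shift.toNat < n := by omega
              rw [dif_pos ⟨hs, hsle, hmb⟩, hk, hb (n - shift.toNat)]
              simp [show n - shift.toNat < n from hklt, Bool.xor_comm]
            · have hk : n ≤ ((n:Int) - shift).toNat := by omega
              have hxb : x.testBit ((n:Int) - shift).toNat = false := by
                rw [hb]; simp; omega
              rw [dif_neg (by tauto), hxb]
              simp
        · have hmb : mask.testBit n = false := by
            rcases h : mask.testBit n
            · rfl
            · rw [hidx, pv_bit mask n, h] at hc2; simp at hc2
          refine ⟨y.testBit n, ?_, ?_⟩
          · rw [hidx] at hc2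
            unfold pvAStep
            simp only [hidx, if_pos hc1, if_neg hc2]
            rw [pv_bit y n]
          · rw [pvG, dif_neg (by simp [hmb])]
      · refine ⟨y.testBit n, ?_, ?_⟩
        · unfold pvAStep
          simp only [hidx, if_neg hc1]
          rw [pv_bit y n]
        · have hns : ¬ (shift ≤ (n:Int)) := by omega
          rw [pvG, dif_neg (by tauto)]
    obtain ⟨B, hstep, hBG⟩ := key
    rw [hstep]
    have hbnn : (0:Int) ≤ (if B then (1:Int) else 0) <<< n := by
      cases B
      · exact Int.natCast_nonneg ((0 <<< n : Nat))
      · exact Int.natCast_nonneg ((1 <<< n : Nat))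
    have hbor : PySem.Int.bor x ((if B then (1:Int) else 0) <<< n) =
        ((x.toNat ||| ((if B then (1:Nat) else 0) <<< n) : Nat) : Int) := by
      rw [PySem.Int.bor_of_nonneg hx hbnn]
      congr 2
      cases B <;> rfl
    rw [hbor]
    constructor
    · positivity
    · intro j
      rw [pv_testBit_toNat _ (by positivity), Int.toNat_natCast, Nat.testBit_or]
      have hxb : x.toNat.testBit j = (decide (j < n) && pvG y mask shift j) := by
        rw [← pv_testBit_toNat x hx]; exact hb j
      have hsb : ((if B then (1:Nat) else 0) <<< n).testBit j = (B && decide (j = n)) := by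
        cases B
        · simp
        · simp only [if_true, pv_one_shiftLeft_testBit, Bool.true_and]
      rcases Nat.lt_trichotomy j n with h|h|h
      · simp [hxb, hsb, h, show j < n + 1 by omega, show j ≠ n by omega]
      · subst h
        rw [hxb, hsb]
        simp [hBG]
      · simp [hxb, hsb, show ¬ (j < n) by omega, show ¬ (j < n+1) by omega,
          show j ≠ n by omega]

theorem pvA_bits (y shift mask : Int) (j : Nat) :
    (unshift_left_xor_and_mask y shift mask).testBit j = (decide (j < 32) && pvG y mask shift j) := by
  unfold unshift_left_xor_and_mask
  obtain ⟨hx, hb⟩ := pvA_inv y shift mask 32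
  have h32 : (PySem.List.pyRange 0 32).foldl (pvAStep y shift mask) 0 = pvAFold y shift mask 32 := rfl
  rw [h32, pv_u32_testBit, hb j]
  rcases Nat.lt_or_ge j 32 with h|h <;> simp [h]

-- ---- B-side loop invariant ----
theorem pv_step_bits (y shift mask z : Int) (hz : 0 ≤ z) (s : Nat) (j : Nat) :
    (pvU32 (PySem.Int.bxor y (PySem.Int.band (z <<< s) mask))).testBit j =
      (decide (j < 32) && ((y.testBit j) ^^ ((decide (j ≥ s) && z.testBit (j - s)) && mask.testBit j))) := by
  rw [pv_u32_testBit, pv_bxor_testBit, pv_band_testBit, pv_shiftLeft_testBit z hz]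

theorem pv_invB_step (y shift mask z : Int) (hshift : 0 < shift) (hlt : shift < 32) (m : Nat)
    (hz : 0 ≤ z) (hhi : ∀ j, 32 ≤ j → z.testBit j = false)
    (hlo : ∀ j, j < m → z.testBit j = pvG y mask shift j) :
    ∀ j, j < min 32 (m + shift.toNat) →
      (pvU32 (PySem.Int.bxor y (PySem.Int.band (z <<< shift.toNat) mask))).testBit j = pvG y mask shift j := by
  intro j hj
  rw [pv_step_bits y shift mask z hz]
  have hj32 : j < 32 := by omega
  rw [pvG]
  by_cases hjs : shift.toNat ≤ j
  · have hrec : z.testBit (j - shift.toNat) = pvG y mask shift (j - shift.toNat) := by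
      apply hlo; omega
    rcases hmb : mask.testBit j with _|_
    · rw [dif_neg (by simp)]
      simp [hj32]
    · rw [dif_pos ⟨hshift, by omega, rfl⟩]
      simp [hj32, hjs, hrec, Bool.xor_comm]
  · have hns : ¬ (shift ≤ (j:Int)) := by omega
    rw [dif_neg (by tauto)]
    simp [hj32, show ¬ (j ≥ shift.toNat) from hjs]

theorem pv_fp_promote (y shift mask : Int) (hshift : 0 < shift) (hlt : shift < 32) :
    ∀ k m (z : Int), 0 ≤ z → (∀ j, 32 ≤ j → z.testBit j = false) →
      (∀ j, j < m → z.testBit j = pvG y mask shift j) →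
      pvU32 (PySem.Int.bxor y (PySem.Int.band (z <<< shift.toNat) mask)) = z →
      32 ≤ m + k →
      ∀ j, j < 32 → z.testBit j = pvG y mask shift j := by
  intro k
  induction k with
  | zero =>
    intro m z _ _ hlo _ hk j hj
    exact hlo j (by omega)
  | succ k ih =>
    intro m z hz hhi hlo hfix hk
    by_cases hm : 32 ≤ m
    · intro j hj; exact hlo j (by omega)
    · apply ih (min 32 (m + shift.toNat)) z hz hhi
      · intro j hj
        rw [← hfix]
        exact pv_invB_step y shift mask z hshift hlt m hz hhi hlo j hj
      · exact hfix
      · have hs1 : 1 ≤ shift.toNat := by omega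
        omega

theorem pv_loop (y shift mask : Int) (hshift : 0 < shift) (hlt : shift < 32) :
    ∀ f m (z : Int), 0 ≤ z → (∀ j, 32 ≤ j → z.testBit j = false) →
      (∀ j, j < m → z.testBit j = pvG y mask shift j) →
      32 ≤ m + f * shift.toNat →
      (0 ≤ pvBIter y shift mask f z ∧
       (∀ j, 32 ≤ j → (pvBIter y shift mask f z).testBit j = false) ∧
       (∀ j, j < 32 → (pvBIter y shift mask f z).testBit j = pvG y mask shift j)) := by
  intro f
  induction f with
  | zero =>
    intro m z hz hhi hlo hfuel
    exact ⟨hz, hhi, fun j hj => hlo j (by omega)⟩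
  | succ f ih =>
    intro m z hz hhi hlo hfuel
    simp only [pvBIter]
    by_cases hfix : pvU32 (PySem.Int.bxor y (PySem.Int.band (z <<< shift.toNat) mask)) = z
    · rw [if_pos hfix]
      exact ⟨hz, hhi, pv_fp_promote y shift mask hshift hlt 32 m z hz hhi hlo hfix (by omega)⟩
    · rw [if_neg hfix]
      apply ih (min 32 (m + shift.toNat)) _ (pv_u32_nonneg _)
      · intro j hj
        rw [pv_u32_testBit]
        simp [show ¬ (j < 32) by omega]
      · exact pv_invB_step y shift mask z hshift hlt m hz hhi hlo
      · have hs1 : 1 ≤ shift.toNat := by omega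
        rcases Nat.lt_or_ge (m + shift.toNat) 32 with h|h
        · have : min 32 (m + shift.toNat) = m + shift.toNat := by omega
          rw [this]
          calc 32 ≤ m + (f+1) * shift.toNat := hfuel
            _ = m + shift.toNat + f * shift.toNat := by ring
        · have : min 32 (m + shift.toNat) = 32 := by omega
          rw [this]; omega

theorem pvB_bits (y shift mask : Int) (j : Nat) :
    0 ≤ unshift_left_xor_and_mask_alt y shift mask ∧
    (unshift_left_xor_and_mask_alt y shift mask).testBit j = (decide (j < 32) && pvG y mask shift j) := by
  unfold unshift_left_xor_and_mask_alt
  by_cases hcase : shift ≤ 0 ∨ 32 ≤ shift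
  · rw [if_pos hcase]
    refine ⟨pv_u32_nonneg y, ?_⟩
    rw [pv_u32_testBit]
    rcases Nat.lt_or_ge j 32 with h|h
    · have hG : pvG y mask shift j = y.testBit j := by
        rw [pvG, dif_neg]
        rintro ⟨h1, h2, -⟩
        rcases hcase with hc|hc <;> omega
      rw [hG]
    · simp [show ¬ (j < 32) by omega]
  · rw [if_neg hcase]
    have hshift : 0 < shift := by omega
    have hlt : shift < 32 := by omega
    have hinit_lo : ∀ j, j < shift.toNat → (pvU32 y).testBit j = pvG y mask shift j := by
      intro i hi
      rw [pv_u32_testBit, pvG, dif_neg]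
      · simp [show i < 32 by omega]
      · rintro ⟨-, hle, -⟩; omega
    have hinit_hi : ∀ j, 32 ≤ j → (pvU32 y).testBit j = false := by
      intro i hi
      rw [pv_u32_testBit]
      simp [show ¬ (i < 32) by omega]
    have hfuel : 32 ≤ shift.toNat + 32 * shift.toNat := by
      have : 1 ≤ shift.toNat := by omega
      omega
    obtain ⟨hnn, hhi, hlo⟩ := pv_loop y shift mask hshift hlt 32 shift.toNat (pvU32 y)
      (pv_u32_nonneg y) hinit_hi hinit_lo hfuel
    refine ⟨hnn, ?_⟩
    rcases Nat.lt_or_ge j 32 with h|h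
    · rw [hlo j h]; simp [h]
    · rw [hhi j h]; simp [show ¬ (j < 32) by omega]

-- ===== VERDICT =====
theorem unshift_left_xor_and_mask_spec : Claim_equal_unshift_left_xor_and_mask := by
  intro y shift mask _
  unfold Spec_unshift_left_xor_and_mask
  apply pv_int_eq_of_bits
  · show 0 ≤ pvU32 _
    exact pv_u32_nonneg _
  · exact (pvB_bits y shift mask 0).1
  · intro j
    rw [pvA_bits y shift mask j, (pvB_bits y shift mask j).2]
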